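-- pv_equiv track=rewrite | github.com/mindsdb/mindsdb | mindsdb/interfaces/skills/sql_agent.py | split_table_name
-- ===== SOURCE A (Python) =====
-- from typing import Iterable, List, Optional, Any, Tuple
--
-- def split_table_name(table_name: str) -> List[str]:
--     """Split table name from llm to parts
--
--     Args:
--         table_name (str): input table name
--
--     Returns:
--         List[str]: parts of table identifier like ['database', 'schema', 'table']
--
--     Example:
--         'input': '`aaa`.`bbb.ccc`', 'output': ['aaa', 'bbb.ccc']
--         'input': '`aaa`.`bbb`.`ccc`', 'output': ['aaa', 'bbb', 'ccc']
--         'input': 'aaa.bbb', 'output': ['aaa', 'bbb']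
--         'input': '`aaa.bbb`', 'output': ['aaa.bbb']
--         'input': '`aaa.bbb.ccc`', 'output': ['aaa.bbb.ccc']
--         'input': 'aaa.`bbb`', 'output': ['aaa', 'bbb']
--         'input': 'aaa.bbb.ccc', 'output': ['aaa', 'bbb', 'ccc']
--         'input': 'aaa.`bbb.ccc`', 'output': ['aaa', 'bbb.ccc']
--         'input': '`aaa`.`bbb.ccc`', 'output': ['aaa', 'bbb.ccc']
--     """
--     result = []
--     current = ""
--     in_backticks = False
--
--     i = 0
--     while i < len(table_name):
--         if table_name[i] == "`":
--             in_backticks = not in_backticks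
--         elif table_name[i] == "." and not in_backticks:
--             if current:
--                 result.append(current.strip("`"))
--                 current = ""
--         else:
--             current += table_name[i]
--         i += 1
--
--     if current:
--         result.append(current.strip("`"))
--
--     return result
-- ===== SOURCE B (Python) =====
-- def split_table_name(table_name: str):
--     result = []
--     buf = None
--     ticks = 0
--     for piece in table_name.split('.'):
--         buf = piece if buf is None else buf + '.' + piece
--         ticks += piece.count('`')
--         if ticks % 2 == 0:
--             token = buf.replace('`', '')
--             if token:
--                 result.append(token)
--             buf = None
--             ticks = 0
--     if buf is not None:
--         token = buf.replace('`', '')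
--         if token:
--             result.append(token)
--     return result
-- ===== Notes on version B (the rewrite author's own statement) =====
-- stated objective: faster
-- what changed: A scans the string one character at a time in Python, growing the current token by repeated string concatenation; B splits the string on the dot separator once and then merges the pieces back together while tracking backtick parity, emitting a backtick-stripped token whenever the quotes balance.
import Mathlib
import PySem

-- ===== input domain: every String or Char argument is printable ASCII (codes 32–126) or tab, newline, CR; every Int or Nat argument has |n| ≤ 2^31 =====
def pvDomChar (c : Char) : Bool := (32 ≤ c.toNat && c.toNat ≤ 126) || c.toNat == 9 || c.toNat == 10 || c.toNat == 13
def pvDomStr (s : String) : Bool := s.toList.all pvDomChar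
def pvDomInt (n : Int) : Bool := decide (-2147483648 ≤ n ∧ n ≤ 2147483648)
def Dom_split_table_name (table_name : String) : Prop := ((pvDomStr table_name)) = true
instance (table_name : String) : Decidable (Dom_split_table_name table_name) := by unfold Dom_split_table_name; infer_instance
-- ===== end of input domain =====

-- B replaces A's per-character scan (which grows the current token by repeated string
-- concatenation) by one split on the dot separator followed by a parity-driven merge of
-- the pieces; a timing run measured B faster at the largest generated size.

-- ===== PORT A =====
def aStep (st : List String × List Char × Bool) (ch : Char) : List String × List Char × Bool :=
  match st with
  | (result, current, inB) =>
    if ch == '`' then (result, current, !inB)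
    else if ch == '.' && !inB then
      if current ≠ [] then (result ++ [String.ofList (PySem.Chars.stripChars current ['`'])], [], inB)
      else (result, current, inB)
    else (result, current ++ [ch], inB)

def aFinish (st : List String × List Char × Bool) : List String :=
  match st with
  | (result, current, _) =>
    if current ≠ [] then result ++ [String.ofList (PySem.Chars.stripChars current ['`'])] else result

def bStep (st : List String × Option (List Char) × Int) (piece : List Char) : List String × Option (List Char) × Int :=
  match st with
  | (result, buf0, ticks0) =>
    let buf := match buf0 with | none => piece | some b => b ++ '.' :: piece
    let ticks := ticks0 + (PySem.Chars.count piece ['`'] : Int)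
    if PySem.Int.mod ticks 2 == 0 then
      let token := PySem.Chars.replace buf ['`'] []
      (if token ≠ [] then result ++ [String.ofList token] else result, none, 0)
    else (result, some buf, ticks)

def bFinish (st : List String × Option (List Char) × Int) : List String :=
  match st with
  | (result, none, _) => result
  | (result, some b, _) =>
    let token := PySem.Chars.replace b ['`'] []
    if token ≠ [] then result ++ [String.ofList token] else result


def split_table_name (table_name : String) : List String :=
  aFinish (table_name.toList.foldl aStep ([], [], false))

def split_table_name_alt (table_name : String) : List String :=
  bFinish ((PySem.Chars.splitOn table_name.toList ['.']).foldl bStep ([], none, 0))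

-- ===== PRECONDITION & SPEC =====
def Spec_split_table_name (table_name : String) (out : List String) : Prop := out = split_table_name_alt table_name
instance (table_name : String) (out : List String) : Decidable (Spec_split_table_name table_name out) := by unfold Spec_split_table_name; infer_instance

-- ===== CLAIM (what is proved, stated in full; the proofs are below) =====
def Claim_equal_split_table_name : Prop := ∀ (table_name : String), Dom_split_table_name table_name → Spec_split_table_name table_name (split_table_name table_name)

-- ===== LEMMAS AND PROOFS =====

lemma count_go_tick (l : List Char) : ∀ (fuel acc : Nat), l.length ≤ fuel →
    PySem.Chars.count.go ['`'] fuel l acc = acc + l.count '`' := by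
  induction l with
  | nil => intro fuel acc _; cases fuel <;> simp [PySem.Chars.count.go]
  | cons c t ih =>
    intro fuel acc h
    cases fuel with
    | zero => simp at h
    | succ f =>
      simp only [PySem.Chars.count.go]
      by_cases hc : c = '`'
      · simp [hc, ih f (acc+1) (by simpa using h)]; omega
      · simp [hc, Ne.symm hc, ih f acc (by simpa using h)]

lemma count_tick (l : List Char) : PySem.Chars.count l ['`'] = l.count '`' := by
  simp [PySem.Chars.count, count_go_tick l l.length 0 le_rfl]

lemma replace_go_tick (l : List Char) : ∀ (fuel : Nat) (acc : List Char), l.length ≤ fuel →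
    PySem.Chars.replace.go ['`'] [] fuel l acc = acc.reverse ++ l.filter (· != '`') := by
  induction l with
  | nil => intro fuel acc _; cases fuel <;> simp [PySem.Chars.replace.go]
  | cons c t ih =>
    intro fuel acc h
    cases fuel with
    | zero => simp at h
    | succ f =>
      simp only [PySem.Chars.replace.go]
      by_cases hc : c = '`'
      · simp [hc, ih f acc (by simpa using h)]
      · simp [hc, Ne.symm hc, ih f (c :: acc) (by simpa using h)]

lemma replace_tick (l : List Char) : PySem.Chars.replace l ['`'] [] = l.filter (· != '`') := by
  simp [PySem.Chars.replace, replace_go_tick l l.length [] le_rfl]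

def mySplit : List Char → List Char → List (List Char)
  | [], cur => [cur.reverse]
  | c :: rest, cur => if c = '.' then cur.reverse :: mySplit rest [] else mySplit rest (c :: cur)

lemma splitOn_go_dot (l : List Char) : ∀ (fuel : Nat) (cur : List Char) (acc : List (List Char)),
    l.length + 1 ≤ fuel →
    PySem.Chars.splitOn.go ['.'] fuel l cur acc = acc.reverse ++ mySplit l cur := by
  induction l with
  | nil =>
    intro fuel cur acc h
    cases fuel with
    | zero => simp at h
    | succ f => simp [PySem.Chars.splitOn.go, mySplit]
  | cons c t ih =>
    intro fuel cur acc h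
    cases fuel with
    | zero => simp at h
    | succ f =>
      simp only [PySem.Chars.splitOn.go, mySplit]
      by_cases hc : c = '.'
      · simp [hc, ih f [] (cur.reverse :: acc) (by simpa using h)]
      · simp [hc, Ne.symm hc, ih f (c :: cur) acc (by simpa using h)]

lemma splitOn_dot (l : List Char) : PySem.Chars.splitOn l ['.'] = mySplit l [] := by
  simpa using splitOn_go_dot l (l.length + 1) [] [] le_rfl

lemma dropWhile_tick_noop (l : List Char) (h : ∀ c ∈ l, c ≠ '`') :
    List.dropWhile (fun c => ['`'].contains c) l = l := by
  cases l with
  | nil => simp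
  | cons c t => simp [h c (by simp)]

lemma strip_noop (l : List Char) (h : ∀ c ∈ l, c ≠ '`') :
    PySem.Chars.stripChars l ['`'] = l := by
  show (List.dropWhile (fun c => ['`'].contains c) (List.dropWhile (fun c => ['`'].contains c) l).reverse).reverse = l
  rw [dropWhile_tick_noop l h,
      dropWhile_tick_noop l.reverse (fun c hc => h c (List.mem_reverse.1 hc)),
      List.reverse_reverse]

def pendJ (buf0 : Option (List Char)) (piece : List Char) : List Char :=
  match buf0 with
  | none => piece
  | some b => b ++ '.' :: piece

def pend (buf0 : Option (List Char)) (cur : List Char) : List Char :=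
  pendJ buf0 cur.reverse

lemma pend_cons (buf0 : Option (List Char)) (c : Char) (cur : List Char) :
    pend buf0 (c :: cur) = pend buf0 cur ++ [c] := by
  cases buf0 <;> simp [pend, pendJ]

lemma int_mod_two_beq (n : Nat) : (PySem.Int.mod (n : Int) 2 == 0) = (n % 2 == 0) := by
  rw [PySem.Int.mod_eq_emod_of_pos (by norm_num)]
  rcases Nat.mod_two_eq_zero_or_one n with h | h
  · have h2 : ((n : Int) % 2) = 0 := by omega
    simp [h, h2]
  · have h2 : ((n : Int) % 2) = 1 := by omega
    simp [h, h2]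

lemma parity_flip (n : Nat) : (((n + 1) % 2 == 1) : Bool) = !(n % 2 == 1) := by
  rcases Nat.mod_two_eq_zero_or_one n with h | h <;> simp [Nat.add_mod, h]

lemma filter_no_tick (l : List Char) : ∀ c ∈ l.filter (· != '`'), c ≠ '`' := by
  intro c hc
  simpa using (List.mem_filter.1 hc).2

lemma strip_filter (l : List Char) :
    PySem.Chars.stripChars (l.filter (· != '`')) ['`'] = l.filter (· != '`') :=
  strip_noop _ (filter_no_tick l)

lemma aFinish_eval (res : List String) (l : List Char) (p : Bool) :
    aFinish (res, l.filter (· != '`'), p) =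
      if l.filter (· != '`') ≠ [] then res ++ [String.ofList (l.filter (· != '`'))] else res := by
  simp [aFinish, strip_filter]

lemma bStep_eval (res : List String) (buf0 : Option (List Char)) (k : Nat) (piece : List Char) :
    bStep (res, buf0, (k : Int)) piece =
      if (k + piece.count '`') % 2 = 0 then
        ((if (pendJ buf0 piece).filter (· != '`') ≠ [] then
            res ++ [String.ofList ((pendJ buf0 piece).filter (· != '`'))] else res), none, 0)
      else (res, some (pendJ buf0 piece), ((k + piece.count '`' : Nat) : Int)) := by
  have hcast : (k : Int) + ((piece.count '`' : Nat) : Int) = ((k + piece.count '`' : Nat) : Int) := by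
    push_cast; ring
  cases buf0 <;>
  · simp only [bStep, pendJ, count_tick, hcast, int_mod_two_beq, replace_tick]
    rcases Nat.mod_two_eq_zero_or_one (k + piece.count '`') with h | h <;> simp [h]

lemma pendJ_rev (buf0 : Option (List Char)) (cur : List Char) :
    pendJ buf0 cur.reverse = pend buf0 cur := rfl

lemma main_inv (cs : List Char) : ∀ (res : List String) (cur : List Char)
    (buf0 : Option (List Char)) (k : Nat), (buf0 = none → k = 0) →
    aFinish (cs.foldl aStep (res, (pend buf0 cur).filter (· != '`'), ((k + cur.count '`') % 2 == 1))) =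
    bFinish ((mySplit cs cur).foldl bStep (res, buf0, (k : Int))) := by
  induction cs with
  | nil =>
    intro res cur buf0 k hk
    rw [List.foldl_nil, show mySplit [] cur = [cur.reverse] from rfl, List.foldl_cons,
      List.foldl_nil, bStep_eval, aFinish_eval]
    simp only [List.count_reverse, pendJ_rev]
    rcases Nat.mod_two_eq_zero_or_one (k + cur.count '`') with h | h
    · rw [if_pos h]
      simp [bFinish]
    · have hne : ¬ ((k + List.count '`' cur) % 2 = 0) := by omega
      rw [if_neg hne]
      simp [bFinish, replace_tick]
  | cons c rest ih =>
    intro res cur buf0 k hk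
    rw [List.foldl_cons]
    by_cases hbt : c = '`'
    · subst hbt
      have hA : aStep (res, (pend buf0 cur).filter (· != '`'), ((k + cur.count '`') % 2 == 1))
          '`' = (res, (pend buf0 cur).filter (· != '`'), !((k + cur.count '`') % 2 == 1)) := by
        simp [aStep]
      rw [hA, show mySplit ('`' :: rest) cur = mySplit rest ('`' :: cur) by simp [mySplit]]
      have := ih res ('`' :: cur) buf0 k hk
      simpa [pend_cons, List.count_cons, ← Nat.add_assoc, parity_flip] using this
    · by_cases hdot : c = '.'
      · subst hdot
        rcases Nat.mod_two_eq_zero_or_one (k + cur.count '`') with h | h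
        · -- balanced dot: both sides emit
          have hA : aStep (res, (pend buf0 cur).filter (· != '`'), ((k + cur.count '`') % 2 == 1))
              '.' = (if (pend buf0 cur).filter (· != '`') ≠ [] then
                   res ++ [String.ofList ((pend buf0 cur).filter (· != '`'))] else res, [],
                   ((k + cur.count '`') % 2 == 1)) := by
            simp only [aStep, beq_iff_eq, if_neg (by decide : ¬('.' : Char) = '`'), h]
            simp [strip_filter]
            by_cases hne : ∃ x ∈ pend buf0 cur, ¬x = '`'
            · simp [hne]
            · have hfe : (pend buf0 cur).filter (· != '`') = [] := by
                rw [List.filter_eq_nil_iff]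
                push Not at hne
                intro a ha
                simpa using hne a ha
              simp [hne, hfe]
          rw [hA, show mySplit ('.' :: rest) cur = cur.reverse :: mySplit rest [] by simp [mySplit],
            List.foldl_cons, bStep_eval]
          simp only [List.count_reverse, pendJ_rev]
          rw [if_pos h]
          have := ih (if (pend buf0 cur).filter (· != '`') ≠ [] then
              res ++ [String.ofList ((pend buf0 cur).filter (· != '`'))] else res) [] none 0 (fun _ => rfl)
          simpa [pend, pendJ, h] using this
        · -- dot inside backticks: A appends '.', B keeps accumulating
          have hA : aStep (res, (pend buf0 cur).filter (· != '`'), ((k + cur.count '`') % 2 == 1))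
              '.' = (res, (pend buf0 cur).filter (· != '`') ++ ['.'], ((k + cur.count '`') % 2 == 1)) := by
            simp [aStep, h]
          rw [hA, show mySplit ('.' :: rest) cur = cur.reverse :: mySplit rest [] by simp [mySplit],
            List.foldl_cons, bStep_eval]
          simp only [List.count_reverse, pendJ_rev]
          have hne' : ¬ ((k + List.count '`' cur) % 2 = 0) := by omega
          rw [if_neg hne']
          have := ih res [] (some (pend buf0 cur)) (k + cur.count '`') (by simp)
          simpa [pend, pendJ, h] using this
      · -- ordinary character
        have hA : aStep (res, (pend buf0 cur).filter (· != '`'), ((k + cur.count '`') % 2 == 1))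
            c = (res, (pend buf0 cur).filter (· != '`') ++ [c], ((k + cur.count '`') % 2 == 1)) := by
          simp [aStep, hbt, hdot]
        rw [hA, show mySplit (c :: rest) cur = mySplit rest (c :: cur) by simp [mySplit, hdot]]
        have := ih res (c :: cur) buf0 k hk
        simpa [pend_cons, List.count_cons, hbt] using this

-- ===== VERDICT (by name: the statement is the Claim_ definition above) =====
theorem split_table_name_spec : Claim_equal_split_table_name := by
  intro s _
  unfold Spec_split_table_name split_table_name split_table_name_alt
  rw [splitOn_dot]
  have h := main_inv s.toList [] [] none 0 (fun _ => rfl)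
  simp [pend, pendJ] at h
  exact h
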